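-- pv_equiv track=rewrite | github.com/alexandraback/datacollection | solutions_5631989306621952_0/Python/lkj/a.py | solve
-- ===== SOURCE A (Python) =====
-- def solve(s):
-- 	curr = s[0]
-- 	for i in range(1, len(s)):
-- 		if s[i] >= curr[0]:
-- 			curr = s[i]+curr
-- 		else:
-- 			curr = curr+s[i]
-- 	return curr
-- ===== SOURCE B (Python) =====
-- def solve(s):
--     # Pass 1: running-maximum table M (M[i] = max of s[:i+1]).
--     M = []
--     m = s[0]
--     for c in s:
--         if m < c:
--             m = c
--         M.append(m)
--     # A character is a "record" exactly when it equals its running maximum.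
--     front = [c for c, r in zip(s, M) if c == r]
--     back = [c for c, r in zip(s, M) if c != r]
--     return ''.join(reversed(front)) + ''.join(back)
-- ===== Notes on version B (the rewrite author's own statement) =====
-- stated objective: faster
-- what changed: B stages the work: one pass builds the running-maximum table M, then two zip/filter comprehensions select the record characters (c == M[i]) and the non-records, and the result is the reversed record string plus the rest, instead of A's in-place prepend/append onto a growing string.
-- outside the precondition, e.g. on solve(''): A raises IndexError, B raises IndexError
import Mathlib
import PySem

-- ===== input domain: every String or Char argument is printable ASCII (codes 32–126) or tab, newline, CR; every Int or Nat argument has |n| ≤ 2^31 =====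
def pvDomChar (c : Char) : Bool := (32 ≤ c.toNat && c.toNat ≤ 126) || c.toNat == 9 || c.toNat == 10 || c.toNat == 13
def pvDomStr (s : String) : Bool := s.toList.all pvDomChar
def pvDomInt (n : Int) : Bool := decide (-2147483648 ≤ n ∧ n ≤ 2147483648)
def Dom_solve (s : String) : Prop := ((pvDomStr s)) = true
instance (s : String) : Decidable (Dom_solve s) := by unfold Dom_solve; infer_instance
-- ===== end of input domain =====

-- B replaces A's in-place prepend/append string building with staged passes:
-- build the running-maximum table, filter record/non-record characters, and
-- concatenate reversed records with the rest; objective: faster (linear joins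
-- instead of quadratic string concatenation).

-- ===== PORT A =====
-- A: curr = s[0]; for each later char x: prepend if x >= curr[0], else append.
def solveStepA (d : Char) (curr : List Char) (x : Char) : List Char :=
  if curr.headD d ≤ x then x :: curr else curr ++ [x]

def solve (s : String) : String :=
  match s.toList with
  | [] => ""   -- unreachable under Pre_solve: Python A raises IndexError on ""
  | c :: cs => String.ofList (cs.foldl (solveStepA c) [c])

-- ===== PORT B =====
-- Source B pass 1: m = s[0]; for c in s: if m < c: m = c; M.append(m)
def buildM (st : Char × List Char) (c : Char) : Char × List Char :=
  if st.1 < c then (c, st.2 ++ [c]) else (st.1, st.2 ++ [st.1])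

def solve_alt (s : String) : String :=
  match s.toList with
  | [] => ""   -- unreachable under Pre_solve: Python B raises IndexError at s[0]
  | c0 :: _ =>
    let l := s.toList
    let M := (l.foldl buildM (c0, [])).2
    let front := ((l.zip M).filter (fun p => p.1 == p.2)).map Prod.fst
    let back := ((l.zip M).filter (fun p => p.1 != p.2)).map Prod.fst
    String.ofList (front.reverse ++ back)

-- ===== PRECONDITION & SPEC =====
-- Pre_ excludes the empty string, on which both Pythons raise IndexError at s[0].
def Pre_solve (s : String) : Prop := s ≠ ""
instance (s : String) : Decidable (Pre_solve s) := by unfold Pre_solve; infer_instance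
def pvWitness_solve : String := "ba"

def Spec_solve (s : String) (out : String) : Prop := out = solve_alt s
instance (s : String) (out : String) : Decidable (Spec_solve s out) := by unfold Spec_solve; infer_instance

-- ===== CLAIM (what is proved, stated in full; the proofs are below) =====
def Claim_equal_solve : Prop := ∀ (s : String), Dom_solve s → Pre_solve s → Spec_solve s (solve s)

-- ===== LEMMAS AND PROOFS =====

-- Proof-side bridge: A's fold rephrased as running-max partition state (m, maxima, rest).
def solveStepP (st : Char × List Char × List Char) (x : Char) : Char × List Char × List Char :=
  if st.1 ≤ x then (x, st.2.1 ++ [x], st.2.2) else (st.1, st.2.1, st.2.2 ++ [x])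

-- Proof-side recursive running-max list.
def runMax (m : Char) : List Char → List Char
  | [] => []
  | c :: cs => if m < c then c :: runMax c cs else m :: runMax m cs

-- Invariant: A's accumulator equals ma.reverse ++ re, whose head is the running max m.
lemma solve_key (d : Char) : ∀ (cs ma re : List Char) (m : Char),
    ma ≠ [] → ma.getLast? = some m →
    cs.foldl (solveStepA d) (ma.reverse ++ re) =
      (cs.foldl solveStepP (m, ma, re)).2.1.reverse ++ (cs.foldl solveStepP (m, ma, re)).2.2 := by
  intro cs
  induction cs with
  | nil => intro ma re m _ _; simp
  | cons x cs ih =>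
    intro ma re m hne hlast
    have hhead : (ma.reverse ++ re).headD d = m := by
      have : ma.reverse.head? = some m := by
        rw [List.head?_reverse]; exact hlast
      cases hma : ma.reverse with
      | nil => simp [hma] at this
      | cons a t =>
        simp [hma] at this
        simp [this]
    simp only [List.foldl_cons]
    by_cases h : m ≤ x
    · have hA : solveStepA d (ma.reverse ++ re) x = (ma ++ [x]).reverse ++ re := by
        unfold solveStepA; rw [hhead, if_pos h]; simp
      have hB : solveStepP (m, ma, re) x = (x, ma ++ [x], re) := by
        simp [solveStepP, h]
      rw [hA, hB]
      exact ih (ma ++ [x]) re x (by simp) (by simp)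
    · have hA : solveStepA d (ma.reverse ++ re) x = ma.reverse ++ (re ++ [x]) := by
        unfold solveStepA; rw [hhead, if_neg h]; simp
      have hB : solveStepP (m, ma, re) x = (m, ma, re ++ [x]) := by
        simp [solveStepP, h]
      rw [hA, hB]
      exact ih ma (re ++ [x]) m hne hlast

-- Source B's pass 1 builds exactly Mrev ++ runMax m cs (for some final max m').
lemma buildM_ex : ∀ (cs : List Char) (m : Char) (Mrev : List Char),
    ∃ m', cs.foldl buildM (m, Mrev) = (m', Mrev ++ runMax m cs) := by
  intro cs
  induction cs with
  | nil => intro m Mrev; exact ⟨m, by simp [runMax]⟩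
  | cons c cs ih =>
    intro m Mrev
    by_cases h : m < c
    · obtain ⟨m', h'⟩ := ih c (Mrev ++ [c])
      exact ⟨m', by simp [buildM, h, runMax]; simpa using h'⟩
    · obtain ⟨m', h'⟩ := ih m (Mrev ++ [m])
      exact ⟨m', by simp [buildM, h, runMax]; simpa using h'⟩

-- The partition state equals the zip/filter selection over the running-max table.
lemma stepP_filters : ∀ (cs : List Char) (m : Char) (fr bk : List Char),
    (cs.foldl solveStepP (m, fr, bk)).2 =
      (fr ++ ((cs.zip (runMax m cs)).filter (fun p => p.1 == p.2)).map Prod.fst,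
       bk ++ ((cs.zip (runMax m cs)).filter (fun p => p.1 != p.2)).map Prod.fst) := by
  intro cs
  induction cs with
  | nil => intro m fr bk; simp [runMax]
  | cons c cs ih =>
    intro m fr bk
    by_cases h : m ≤ c
    · have hm' : (if m < c then c :: runMax c cs else m :: runMax m cs) = c :: runMax c cs := by
        by_cases h' : m < c
        · simp [h']
        · have hmc : m = c := le_antisymm h (le_of_not_gt h')
          simp [hmc]
      simp only [runMax, List.foldl_cons, solveStepP, if_pos h, hm', List.zip_cons_cons]
      rw [ih c (fr ++ [c]) bk]
      simp
    · have hnlt : ¬ m < c := fun h' => h (le_of_lt h')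
      have hne : c ≠ m := fun he => h (le_of_eq he.symm)
      simp only [runMax, List.foldl_cons, solveStepP, if_neg h, if_neg hnlt, List.zip_cons_cons]
      rw [ih m fr (bk ++ [c])]
      simp [hne]

-- ===== VERDICT (by name: the statement is the Claim_ definition above) =====
theorem solve_spec : Claim_equal_solve := by
  intro s _ _
  unfold Spec_solve solve solve_alt
  cases hs : s.toList with
  | nil => rfl
  | cons c cs =>
    have hA := solve_key c cs [c] [] c (by simp) (by simp)
    simp only [List.reverse_cons, List.reverse_nil, List.nil_append, List.append_nil] at hA
    have hP := stepP_filters cs c [c] []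
    obtain ⟨m', hM⟩ := buildM_ex cs c [c]
    have hM2 : ((c :: cs).foldl buildM (c, [])).2 = c :: runMax c cs := by
      simp [buildM, hM]
    simp only [hA, hP, hM2, List.zip_cons_cons]
    simp
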